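-- pv_equiv track=rewrite | github.com/arg-hya/sLangWordsProject | FilterPipeline.py | allCharactersSame
-- ===== SOURCE A (Python) =====
-- def allCharactersSame(s):
--     if not s:
--         return True
--
--     #store first character
--     s1 = {s[0]}
--
--     # Insert characters in
--     # the set
--     for i in range(1, len(s)):
--         s1.add(s[i])
--
--     # If all characters are same
--     # Size of set will always be 1
--     if (len(s1) == 1):
--         return True
--     else:
--         return False
-- ===== SOURCE B (Python) =====
-- def allCharactersSame(s):
--     # early-exit scan against the first character; empty string vacuously True
--     return all(c == s[0] for c in s)
-- ===== Notes on version B (the rewrite author's own statement) =====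
-- stated objective: simpler
-- what changed: Replaces the accumulation of a set of all distinct characters (then checking its size) with a single early-exiting scan comparing every character to the first.
import Mathlib
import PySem

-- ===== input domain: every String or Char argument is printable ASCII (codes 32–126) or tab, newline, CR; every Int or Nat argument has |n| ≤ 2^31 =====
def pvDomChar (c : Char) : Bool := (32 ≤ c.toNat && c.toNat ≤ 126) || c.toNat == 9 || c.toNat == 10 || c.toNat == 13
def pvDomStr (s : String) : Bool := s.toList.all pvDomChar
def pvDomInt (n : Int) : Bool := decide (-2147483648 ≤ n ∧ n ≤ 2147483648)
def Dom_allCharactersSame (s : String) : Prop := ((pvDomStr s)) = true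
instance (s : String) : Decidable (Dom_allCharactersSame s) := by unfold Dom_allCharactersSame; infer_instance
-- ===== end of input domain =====

-- B replaces A's set accumulation + size check by an early-exiting scan against the first character (simpler).

-- ===== PORT A =====
def allCharactersSame (s : String) : Bool :=
  let l := s.toList
  if l.isEmpty then true
  else
    -- s1 = {s[0]}
    let s1 : PySem.Set Char := PySem.Set.add PySem.Set.empty (PySem.List.pyGetD l 0 ' ')
    -- for i in range(1, len(s)): s1.add(s[i])
    let s1 := (PySem.List.pyRange 1 (l.length : Int) 1).foldl
      (fun st i => PySem.Set.add st (PySem.List.pyGetD l i ' ')) s1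
    if PySem.Set.len s1 = 1 then true else false

-- ===== PORT B =====
def allCharactersSame_alt (s : String) : Bool :=
  match s.toList with
  | [] => true
  | c0 :: _ => s.toList.all (fun c => c == c0)

-- ===== PRECONDITION & SPEC =====
def Spec_allCharactersSame (s : String) (out : Bool) : Prop := out = allCharactersSame_alt s
instance (s : String) (out : Bool) : Decidable (Spec_allCharactersSame s out) := by unfold Spec_allCharactersSame; infer_instance

-- ===== CLAIM (what is proved, stated in full; the proofs are below) =====
def Claim_equal_allCharactersSame : Prop := ∀ (s : String), Dom_allCharactersSame s → Spec_allCharactersSame s (allCharactersSame s)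

-- ===== LEMMAS AND PROOFS =====

theorem pv_add_length_le (s : PySem.Set Char) (x : Char) : s.length ≤ (PySem.Set.add s x).length := by
  simp [PySem.Set.add]; split <;> simp

theorem pv_foldl_add_length_le (rest : List Char) (s : PySem.Set Char) :
    s.length ≤ (rest.foldl PySem.Set.add s).length := by
  induction rest generalizing s with
  | nil => simp
  | cons x xs ih => exact le_trans (pv_add_length_le s x) (ih _)

theorem pv_key (rest : List Char) (c0 : Char) :
    (decide ((rest.foldl PySem.Set.add [c0]).length = 1)) = rest.all (fun c => c == c0) := by
  induction rest with
  | nil => simp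
  | cons x xs ih =>
    by_cases hx : x = c0
    · subst hx
      simp only [List.foldl_cons, List.all_cons]
      have : PySem.Set.add [x] x = [x] := by
        simp [PySem.Set.add, PySem.Set.contains]
      simp only [this, ih]; simp
    · simp only [List.foldl_cons, List.all_cons]
      have hadd : PySem.Set.add [c0] x = [c0, x] := by
        simp [PySem.Set.add, PySem.Set.contains, hx]
      simp only [hadd]
      have hlen := pv_foldl_add_length_le xs [c0, x]
      simp only [List.length_cons, List.length_nil] at hlen
      have : ¬ (xs.foldl PySem.Set.add [c0, x]).length = 1 := by omega
      simp [this, beq_iff_eq, hx]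

-- ===== VERDICT (by name: the statement is the Claim_ definition above) =====
theorem allCharactersSame_spec : Claim_equal_allCharactersSame := by
  unfold Claim_equal_allCharactersSame
  intro s _
  unfold Spec_allCharactersSame allCharactersSame allCharactersSame_alt
  cases h : s.toList with
  | nil => simp
  | cons c0 rest =>
    simp only [List.isEmpty_cons, if_neg Bool.false_ne_true]
    have hget0 : PySem.List.pyGetD (c0 :: rest) 0 ' ' = c0 := by
      simp [PySem.List.pyGetD, PySem.List.pyGet?, PySem.List.pyIdx?]
    have hfold : (PySem.List.pyRange 1 ((c0 :: rest).length : Int) 1).foldl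
        (fun st i => PySem.Set.add st (PySem.List.pyGetD (c0 :: rest) i ' ')) [c0]
        = rest.foldl PySem.Set.add [c0] := by
      have := PySem.List.foldl_pyRange_pyGetD (xs := c0 :: rest) (a := (1 : Int))
        (f := PySem.Set.add) (d := ' ') (init := [c0]) (by norm_num)
      simpa using this
    have hempty : PySem.Set.add PySem.Set.empty c0 = [c0] := by
      simp [PySem.Set.add, PySem.Set.empty, PySem.Set.contains]
    simp only [hget0, hempty, hfold, PySem.Set.len]
    rw [show ((c0 :: rest).all fun c => c == c0) = rest.all (fun c => c == c0) by simp]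
    rw [← pv_key rest c0]
    by_cases hc : (rest.foldl PySem.Set.add [c0]).length = 1 <;> simp [hc]
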